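-- pv_equiv track=rewrite | github.com/OlesyaKhvostova/python | Lesson-5/lesson-5-dz-5.py | get_uniq
-- ===== SOURCE A (Python) =====
-- def get_uniq(src):
--     uniq_values = set()
--     all_val = set()
--
--     for val in src:
--         if val not in all_val:
--             uniq_values.add(val)
--         else:
--             uniq_values.discard(val)
--
--         all_val.add(val)
--
--     return uniq_values
-- ===== SOURCE B (Python) =====
-- def get_uniq(src):
--     counts = {}
--     for val in src:
--         counts[val] = counts.get(val, 0) + 1
--     return {val for val, cnt in counts.items() if cnt == 1}
-- ===== Notes on version B (the rewrite author's own statement) =====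
-- stated objective: idiomatic
-- what changed: B builds a frequency dict in one unconditional counting pass and then selects keys with count 1 in a separate filtering pass, instead of A's single pass that conditionally adds/discards between two membership sets.
import Mathlib
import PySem

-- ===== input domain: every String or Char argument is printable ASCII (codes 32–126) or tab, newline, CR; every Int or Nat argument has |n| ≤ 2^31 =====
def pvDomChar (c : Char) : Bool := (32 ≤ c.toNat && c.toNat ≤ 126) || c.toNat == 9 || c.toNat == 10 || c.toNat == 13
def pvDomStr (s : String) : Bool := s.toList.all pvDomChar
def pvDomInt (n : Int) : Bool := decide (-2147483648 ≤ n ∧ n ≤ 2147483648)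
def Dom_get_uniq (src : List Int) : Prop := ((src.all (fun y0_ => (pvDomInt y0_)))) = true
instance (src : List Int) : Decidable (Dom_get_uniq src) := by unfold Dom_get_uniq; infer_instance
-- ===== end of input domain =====

-- B replaces A's one-pass add/discard over two membership sets by an unconditional
-- counting pass into a dict followed by a separate selection of count-1 keys (idiomatic; same cost).

-- ===== PORT A =====
-- one pass: uniq_values/all_val sets; conditionally add or discard, then record in all_val
def get_uniq (src : List Int) : List Int :=
  (src.foldl
    (fun (st : PySem.Set Int × PySem.Set Int) val =>
      ((if PySem.Set.contains st.2 val = false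
          then PySem.Set.add st.1 val
          else PySem.Set.discard st.1 val),
       PySem.Set.add st.2 val))
    (PySem.Set.empty, PySem.Set.empty)).1

-- ===== PORT B =====
-- pass 1: counts[val] = counts.get(val, 0) + 1 ; pass 2: {val for val, cnt in counts.items() if cnt == 1}
def get_uniq_alt (src : List Int) : List Int :=
  let counts : PySem.Dict Int Int :=
    src.foldl (fun d val => d.insert val (d.getD val 0 + 1)) PySem.Dict.empty
  PySem.Set.ofList (((counts.items.filter (fun p => p.2 == (1 : Int)))).map (·.1))

-- ===== PRECONDITION & SPEC =====
def Spec_get_uniq (src : List Int) (out : List Int) : Prop := out = get_uniq_alt src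
instance (src : List Int) (out : List Int) : Decidable (Spec_get_uniq src out) := by unfold Spec_get_uniq; infer_instance

-- ===== CLAIM (what is proved, stated in full; the proofs are below) =====
def Claim_equal_get_uniq : Prop := ∀ (src : List Int), Dom_get_uniq src → Spec_get_uniq src (get_uniq src)

-- ===== LEMMAS AND PROOFS =====

-- A's loop invariant: after processing xs, all_val = set(xs) and
-- uniq_values = the first-occurrence-ordered elements whose count in xs is exactly 1.
theorem get_uniq_loop (xs : List Int) :
    xs.foldl
      (fun (st : PySem.Set Int × PySem.Set Int) val =>
        ((if PySem.Set.contains st.2 val = false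
            then PySem.Set.add st.1 val
            else PySem.Set.discard st.1 val),
         PySem.Set.add st.2 val))
      (PySem.Set.empty, PySem.Set.empty)
    = ((PySem.Set.ofList xs).filter (fun v => xs.count v == 1), PySem.Set.ofList xs) := by
  induction xs using List.reverseRecOn with
  | nil => rfl
  | append_singleton xs x ih =>
    rw [List.foldl_append, ih]
    simp only [List.foldl_cons, List.foldl_nil]
    have hof : PySem.Set.ofList (xs ++ [x]) = PySem.Set.add (PySem.Set.ofList xs) x := by
      simp [PySem.Set.ofList, List.foldl_append]
    by_cases hx : x ∈ xs
    · have hc : PySem.Set.contains (PySem.Set.ofList xs) x = true := by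
        simpa [PySem.Set.contains, PySem.Set.mem_ofList] using hx
      have hadd : PySem.Set.add (PySem.Set.ofList xs) x = PySem.Set.ofList xs := by
        simp only [PySem.Set.add, hc, if_pos]
      refine Prod.ext ?_ (by simp [hof, hadd])
      simp only [hc]
      show PySem.Set.discard _ x = _
      rw [hof, hadd]
      simp only [PySem.Set.discard, List.filter_filter]
      apply List.filter_congr
      intro v hv
      by_cases hvx : v = x
      · subst hvx
        have h1 : 1 ≤ xs.count v := List.one_le_count_iff.mpr hx
        simp [List.count_append]
        omega
      · simp [List.count_append, Ne.symm hvx, beq_iff_eq, hvx]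
    · have hc : PySem.Set.contains (PySem.Set.ofList xs) x = false := by
        simpa [PySem.Set.contains, PySem.Set.mem_ofList] using hx
      have hadd : PySem.Set.add (PySem.Set.ofList xs) x = PySem.Set.ofList xs ++ [x] := by
        simp only [PySem.Set.add, hc, Bool.false_eq_true, if_false]
      refine Prod.ext ?_ (by simp [hof, hadd])
      simp only [hc]
      show PySem.Set.add _ x = _
      rw [hof, hadd]
      have hxuniq : x ∉ (PySem.Set.ofList xs).filter (fun v => xs.count v == 1) := by
        intro h
        exact hx ((PySem.Set.mem_ofList xs x).mp (List.mem_of_mem_filter h))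
      have haddu : PySem.Set.add ((PySem.Set.ofList xs).filter (fun v => xs.count v == 1)) x
          = (PySem.Set.ofList xs).filter (fun v => xs.count v == 1) ++ [x] := by
        simp [PySem.Set.add, PySem.Set.contains, hxuniq]
      rw [haddu, List.filter_append]
      congr 1
      · apply List.filter_congr
        intro v hv
        have hvxs : v ∈ xs := (PySem.Set.mem_ofList xs v).mp hv
        have hvx : v ≠ x := fun h => hx (h ▸ hvxs)
        simp [List.count_append, Ne.symm hvx]
      · have h0 : xs.count x = 0 := List.count_eq_zero.mpr hx
        simp [List.count_append, h0]

-- B computes the same set: counter, items filter, key projection.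
theorem get_uniq_alt_eq (src : List Int) :
    get_uniq_alt src = (PySem.Set.ofList src).filter (fun v => src.count v == 1) := by
  show PySem.Set.ofList ((((src.foldl (fun d val => d.insert val (d.getD val 0 + 1))
      PySem.Dict.empty).items.filter (fun p => p.2 == (1 : Int)))).map (·.1))
    = (PySem.Set.ofList src).filter (fun v => src.count v == 1)
  rw [PySem.Dict.foldl_insert_getD_add_one_eq_counter, PySem.Dict.items_counter]
  simp only [List.filter_map, List.map_map, Function.comp_def]
  have hkeys : ((PySem.Set.ofList src).filter (fun k => ((src.count k : Int) == 1))).map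
        (fun k => k)
      = (PySem.Set.ofList src).filter (fun v => src.count v == 1) := by
    rw [List.map_id']
    apply List.filter_congr
    intro v _
    by_cases h : src.count v = 1 <;> simp [h]
  rw [hkeys]
  exact PySem.Set.ofList_eq_self_of_nodup _
    (List.Nodup.filter _ (PySem.Set.nodup_ofList src))

-- ===== VERDICT (by name: the statement is the Claim_ definition above) =====
theorem get_uniq_spec : Claim_equal_get_uniq := by
  intro src _
  show get_uniq src = get_uniq_alt src
  rw [get_uniq_alt_eq]
  unfold get_uniq
  rw [get_uniq_loop]
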